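-- pv_equiv track=rewrite | github.com/podhmo/individual-sandbox | daily/20161024/example_conversion/convert.py | pre_gencode
-- ===== SOURCE A (Python) =====
-- from collections import ChainMap, deque, defaultdict, namedtuple, OrderedDict
--
-- Action = namedtuple("Action", "action, src, dst")
--
-- def pre_gencode(mapping_path):
--     # normalize mapping_path
--     # e.g. (coerce (array x) (array y))
--     #         -> (coerce (array x) x), (coerce x y), (coerce y (array y))
--     # e.g. (coerce (array array x) (array array y))
--     #         -> (coerce (array array x) (array x)), (coerce (array x) x), (coerce x y)(coerce y (array y)), (coerce (array y) (array array y))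
--     # normalized = []
--     # for action in mapping_path:
--     #     if action.action == "coerce":
--     #         if "array" in action.src:
--     #             # (p array p x) -> (coerce (p array p x) (array p x)) (coerce (array p x) (pointer x))
--     #             pre_array, post_array = [], []
--     unfolded = []
--     for action in mapping_path:
--         if action[0] != "coerce":
--             unfolded.append(action)
--             continue
--
--         # src transform
--         src = action[1]
--         i = 0
--         sub_indices = [0]
--         src_tmp = []
--         for x in src:
--             i += 1
--             if x == "array":
--                 if src[sub_indices[-1]] == "array":
--                     src_tmp.append(Action(action="coerce", src=src[sub_indices[-1]:], dst=src[i:]))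
--                 else:
--                     src_tmp.append(Action(action="coerce", src=src[sub_indices[-1]:], dst=src[i - 1:]))
--                     src_tmp.append(Action(action="coerce", src=src[i - 1:], dst=src[i:]))
--                 sub_indices.append(i)
--
--         if len(sub_indices) == 1:
--             unfolded.append(action)
--             continue
--         last_src = src[sub_indices[-1]:]
--
--         # dst transform
--         dst = action[2]
--         dst_tmp = []
--         i = 0
--         sub_indices = [0]
--         for x in dst:
--             i += 1
--             if x == "array":
--                 if dst[sub_indices[-1]] == "array":
--                     dst_tmp.append(Action(action="coerce", dst=dst[sub_indices[-1]:], src=dst[i:]))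
--                 else:
--                     dst_tmp.append(Action(action="coerce", dst=dst[sub_indices[-1]:], src=dst[i - 1:]))
--                     dst_tmp.append(Action(action="coerce", dst=dst[i - 1:], src=dst[i:]))
--                 sub_indices.append(i)
--
--         # if len(sub_indices) == 1:
--         #     raise ValueError("invalid operation {}".format(action))
--
--         first_dst = dst[sub_indices[-1]:]
--         unfolded.extend(src_tmp)
--         unfolded.append(Action(action="coerce", src=last_src, dst=first_dst))
--         unfolded.extend(reversed(dst_tmp))
--
--     r = []
--     for ac in unfolded:
--         if ac[1] == ac[2]:
--             continue
--         r.append(ac)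
--     return r
-- ===== SOURCE B (Python) =====
-- def _nodes(seq):
--     """All intermediate types of the coercion chain for seq, as suffixes of seq.
--     An index i is a chain checkpoint iff it is the start, or it directly follows an
--     'array' token, or it sits on an 'array' token that does not follow another one."""
--     n = len(seq)
--     cuts = [i for i in range(n + 1)
--             if i == 0
--             or seq[i - 1] == "array"
--             or (i < n and seq[i] == "array" and seq[i - 1] != "array")]
--     return [seq[i:] for i in cuts]
--
--
-- def pre_gencode(mapping_path):
--     out = []
--     for action in mapping_path:
--         if action[0] == "coerce":
--             src_nodes = _nodes(action[1])
--             if len(src_nodes) > 1: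
--                 chain = src_nodes + _nodes(action[2])[::-1]
--                 out.extend(("coerce", a, b) for a, b in zip(chain, chain[1:]))
--                 continue
--         out.append(action)
--     return [ac for ac in out if ac[1] != ac[2]]
-- ===== Notes on version B (the rewrite author's own statement) =====
-- stated objective: simpler
-- what changed: Replaces A's stateful prev/sub_indices scan (duplicated for src and dst, with an adjacent-'array' special case and step-by-step emission) by a declarative characterisation: a local cut predicate on indices yields each sequence's chain of intermediate suffixes in one comprehension, and all emitted coercions are just the adjacent pairs of one zipped chain src_nodes + reversed dst_nodes (bridge step included), with a final filter comprehension.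
import Mathlib
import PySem

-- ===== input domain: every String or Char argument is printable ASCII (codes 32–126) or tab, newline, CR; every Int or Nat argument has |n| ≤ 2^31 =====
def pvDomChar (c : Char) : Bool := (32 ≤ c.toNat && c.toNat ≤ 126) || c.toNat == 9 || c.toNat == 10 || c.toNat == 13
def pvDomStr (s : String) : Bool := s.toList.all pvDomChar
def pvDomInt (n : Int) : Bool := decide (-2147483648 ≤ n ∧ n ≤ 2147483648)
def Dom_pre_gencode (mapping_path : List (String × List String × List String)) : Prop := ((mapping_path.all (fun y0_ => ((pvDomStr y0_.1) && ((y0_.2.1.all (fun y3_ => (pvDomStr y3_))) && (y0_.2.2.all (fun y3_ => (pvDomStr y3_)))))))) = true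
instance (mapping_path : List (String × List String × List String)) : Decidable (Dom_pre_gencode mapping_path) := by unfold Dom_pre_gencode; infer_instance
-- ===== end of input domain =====

-- B replaces A's prev/sub_indices scan (with its adjacency branch and dst re-scan) by a
-- checkpoint characterisation: a local cut predicate picks the chain's intermediate suffixes,
-- and one zip of adjacent nodes of src-chain ++ reversed-dst-chain yields all steps
-- (objective: simpler); return values proved equal on all inputs.


-- ===== PORT A =====
-- A's Action namedtuple is ported as the tuple (action, src, dst).  Loop counter i and the
-- entries of sub_indices are nonnegative counters, carried as Nat; the indexing
-- src[sub_indices[-1]] is always in range in A (sub_indices[-1] ≤ current index < len src),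
-- so the .getD default is never used and the port is exact.
def pre_gencode (mapping_path : List (String × List String × List String)) : List (String × List String × List String) :=
  let unfolded := mapping_path.foldl (fun unfolded action =>
    if action.1 != "coerce" then unfolded ++ [action]
    else
      -- src transform
      let src := action.2.1
      let st := src.foldl (fun (st : Nat × List Nat × List (String × List String × List String)) x =>
          let i := st.1 + 1
          if x == "array" then
            let p := ((PySem.List.pyGet? st.2.1 (-1)).getD 0)
            if ((PySem.List.pyGet? src (p : Int)).getD "") == "array" then
              (i, st.2.1 ++ [i], st.2.2 ++ [("coerce", PySem.List.slice src (some (p : Int)) none, PySem.List.slice src (some (i : Int)) none)])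
            else
              (i, st.2.1 ++ [i], st.2.2 ++ [("coerce", PySem.List.slice src (some (p : Int)) none, PySem.List.slice src (some ((i - 1 : Nat) : Int)) none),
                                            ("coerce", PySem.List.slice src (some ((i - 1 : Nat) : Int)) none, PySem.List.slice src (some (i : Int)) none)])
          else (i, st.2.1, st.2.2)) (0, [0], [])
      if st.2.1.length == 1 then unfolded ++ [action]
      else
        let last_src := PySem.List.slice src (some (((PySem.List.pyGet? st.2.1 (-1)).getD 0 : Nat) : Int)) none
        -- dst transform (keyword arguments swapped in A's source)
        let dst := action.2.2
        let dt := dst.foldl (fun (st : Nat × List Nat × List (String × List String × List String)) x =>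
          let i := st.1 + 1
          if x == "array" then
            let p := ((PySem.List.pyGet? st.2.1 (-1)).getD 0)
            if ((PySem.List.pyGet? dst (p : Int)).getD "") == "array" then
              (i, st.2.1 ++ [i], st.2.2 ++ [("coerce", PySem.List.slice dst (some (i : Int)) none, PySem.List.slice dst (some (p : Int)) none)])
            else
              (i, st.2.1 ++ [i], st.2.2 ++ [("coerce", PySem.List.slice dst (some ((i - 1 : Nat) : Int)) none, PySem.List.slice dst (some (p : Int)) none),
                                            ("coerce", PySem.List.slice dst (some (i : Int)) none, PySem.List.slice dst (some ((i - 1 : Nat) : Int)) none)])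
          else (i, st.2.1, st.2.2)) (0, [0], [])
        let first_dst := PySem.List.slice dst (some (((PySem.List.pyGet? dt.2.1 (-1)).getD 0 : Nat) : Int)) none
        unfolded ++ st.2.2 ++ [("coerce", last_src, first_dst)] ++ dt.2.2.reverse) []
  unfolded.foldl (fun r ac => if ac.2.1 == ac.2.2 then r else r ++ [ac]) []

-- ===== PORT B =====
-- Source B's cut predicate (the comprehension's condition); short-circuit order preserved by ||,
-- and where Python never evaluates an index the getD default cannot change the Bool value.
def pvCutP (seq : List String) (i : Int) : Bool :=
  i == 0
  || ((PySem.List.pyGet? seq (i - 1)).getD "" == "array")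
  || (decide (i < (seq.length : Int)) && ((PySem.List.pyGet? seq i).getD "" == "array")
        && !((PySem.List.pyGet? seq (i - 1)).getD "" == "array"))

-- Source B's _nodes: filter range(n+1) by the cut predicate, then take the suffixes seq[i:]
def pvNodes (seq : List String) : List (List String) :=
  (((PySem.List.pyRange 0 ((seq.length : Int) + 1) 1).filter (pvCutP seq)).map
    (fun i => PySem.List.slice seq (some i) none))

def pre_gencode_alt (mapping_path : List (String × List String × List String)) : List (String × List String × List String) :=
  let out := mapping_path.foldl (fun out action =>
    if action.1 == "coerce" then
      let src_nodes := pvNodes action.2.1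
      if 1 < src_nodes.length then
        let chain := src_nodes ++ (pvNodes action.2.2).reverse
        out ++ (chain.zip (PySem.List.slice chain (some 1) none)).map (fun pr => ("coerce", pr.1, pr.2))
      else out ++ [action]
    else out ++ [action]) []
  out.filter (fun ac => ac.2.1 != ac.2.2)

-- ===== PRECONDITION & SPEC =====
def Spec_pre_gencode (mapping_path : List (String × List String × List String)) (out : List (String × List String × List String)) : Prop := out = pre_gencode_alt mapping_path
instance (mapping_path : List (String × List String × List String)) (out : List (String × List String × List String)) : Decidable (Spec_pre_gencode mapping_path out) := by unfold Spec_pre_gencode; infer_instance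

-- ===== CLAIM (what is proved, stated in full; the proofs are below) =====
def Claim_equal_pre_gencode : Prop := ∀ (mapping_path : List (String × List String × List String)), Dom_pre_gencode mapping_path → Spec_pre_gencode mapping_path (pre_gencode mapping_path)

-- ===== LEMMAS AND PROOFS =====

-- A's two inline loops, abstracted over the emit direction (e = how a step pair becomes a tuple).
def pvAStep (e : List String → List String → String × List String × List String) (seq : List String)
    (st : Nat × List Nat × List (String × List String × List String)) (x : String) :
    Nat × List Nat × List (String × List String × List String) :=
  let i := st.1 + 1
  if x == "array" then
    let p := ((PySem.List.pyGet? st.2.1 (-1)).getD 0)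
    if ((PySem.List.pyGet? seq (p : Int)).getD "") == "array" then
      (i, st.2.1 ++ [i], st.2.2 ++ [e (PySem.List.slice seq (some (p : Int)) none) (PySem.List.slice seq (some (i : Int)) none)])
    else
      (i, st.2.1 ++ [i], st.2.2 ++ [e (PySem.List.slice seq (some (p : Int)) none) (PySem.List.slice seq (some ((i - 1 : Nat) : Int)) none),
                                    e (PySem.List.slice seq (some ((i - 1 : Nat) : Int)) none) (PySem.List.slice seq (some (i : Int)) none)])
  else (i, st.2.1, st.2.2)

-- the "array" positions of seq counted from offset s
def pvPos (seq : List String) (s : Int) : List Int :=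
  ((PySem.List.enumerate seq s).filter (fun jx => jx.2 == "array")).map (fun jx => jx.1)

-- the stepwise coercion index pairs A emits, indexed by the array positions and the running prev
def pvPairs : List Int → Int → List (Int × Int)
  | [], _ => []
  | j :: rest, p => (if p = j then [(p, j + 1)] else [(p, j), (j, j + 1)]) ++ pvPairs rest (j + 1)

-- the chain checkpoints after the leading 0, indexed the same way
def pvCutsOf : List Int → Int → List Int
  | [], _ => []
  | j :: rest, p => (if p = j then [j + 1] else [j, j + 1]) ++ pvCutsOf rest (j + 1)

-- adjacent pairs of a list (what chain.zip(chain[1:]) computes)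
def pvZipAdj {α : Type} (l : List α) : List (α × α) := l.zip l.tail

lemma pvPos_nil (s : Int) : pvPos [] s = [] := by
  simp [pvPos, PySem.List.enumerate]

lemma pvPos_cons (x : String) (xs : List String) (s : Int) :
    pvPos (x :: xs) s = if x == "array" then s :: pvPos xs (s + 1) else pvPos xs (s + 1) := by
  by_cases h : x == "array" <;> simp [pvPos, PySem.List.enumerate_cons, h]

lemma pvPos_ge (xs : List String) : ∀ (s j : Int), j ∈ pvPos xs s → s ≤ j := by
  induction xs with
  | nil => intro s j h; rw [pvPos_nil] at h; cases h
  | cons x xs ih =>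
    intro s j h
    rw [pvPos_cons] at h
    by_cases hx : x == "array"
    · rw [if_pos hx] at h
      rcases List.mem_cons.mp h with h | h
      · omega
      · have := ih (s + 1) j h; omega
    · rw [if_neg hx] at h
      have := ih (s + 1) j h; omega

-- The main loop correspondence: A's bookkeeping fold over the remaining tokens emits exactly
-- the pvPairs of the remaining "array" positions.
lemma pvGrand (e : List String → List String → String × List String × List String) (seq : List String) :
    ∀ (t : List String) (n p : Nat) (subs : List Nat) (tmp : List (String × List String × List String)),
      seq.drop n = t → p ≤ n →
      (∀ k : Nat, p ≤ k → k < n → seq[k]? ≠ some "array") →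
      subs.getLast? = some p →
      t.foldl (pvAStep e seq) (n, subs, tmp) =
        (n + t.length,
         subs ++ (pvPos t (n : Int)).map (fun j => j.toNat + 1),
         tmp ++ (pvPairs (pvPos t (n : Int)) (p : Int)).map
           (fun pr => e (PySem.List.slice seq (some pr.1) none) (PySem.List.slice seq (some pr.2) none))) := by
  intro t
  induction t with
  | nil => intro n p subs tmp _ _ _ _; simp [pvPos_nil, pvPairs]
  | cons x xs ih =>
    intro n p subs tmp ht hpn hgap hlast
    have hn : seq[n]? = some x := by
      have h0 : (seq.drop n)[0]? = seq[n + 0]? := List.getElem?_drop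
      rw [ht] at h0
      simp only [List.getElem?_cons_zero, Nat.add_zero] at h0
      exact h0.symm
    have hxs : seq.drop (n + 1) = xs := by
      rw [← List.tail_drop, ht]; rfl
    have hnlen : n < seq.length := by
      by_contra hc
      rw [List.getElem?_eq_none (by omega)] at hn
      cases hn
    rw [List.foldl_cons]
    by_cases hx : x == "array"
    · -- x is "array"
      have hxe : x = "array" := by simpa using hx
      have hpget : PySem.List.pyGet? subs (-1) = some p := by
        rw [PySem.List.pyGet?_neg_one, hlast]
      have hgap' : ∀ k : Nat, n + 1 ≤ k → k < n + 1 → seq[k]? ≠ some "array" := by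
        intro k h1 h2; omega
      have hlast' : (subs ++ [n + 1]).getLast? = some (n + 1) := by simp
      by_cases hpe : p = n
      · -- adjacent: src[sub_indices[-1]] == "array"
        have hcond : seq[p]? = some "array" := by rw [hpe, hn, hxe]
        have hstep : pvAStep e seq (n, subs, tmp) x =
            (n + 1, subs ++ [n + 1],
             tmp ++ [e (PySem.List.slice seq (some (p : Int)) none) (PySem.List.slice seq (some ((n + 1 : Nat) : Int)) none)]) := by
          simp [pvAStep, hx, hpget, hcond]
        rw [hstep, ih (n + 1) (n + 1) (subs ++ [n + 1]) _ hxs (by omega) hgap' hlast']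
        rw [pvPos_cons, if_pos (by simp [hxe])]
        have hseg : pvPairs ((n : Int) :: pvPos xs ((n : Int) + 1)) (p : Int) =
            [((p : Int), (n : Int) + 1)] ++ pvPairs (pvPos xs ((n : Int) + 1)) ((n : Int) + 1) := by
          simp [pvPairs, hpe]
        rw [hseg]
        refine Prod.ext (by simp; omega) (Prod.ext ?_ ?_)
        · simp
        · push_cast
          simp [List.append_assoc]
      · -- non-adjacent boundary: two steps
        have hplt : p < n := by omega
        have hsomev : ∃ v, seq[p]? = some v ∧ v ≠ "array" := by
          have hplen : p < seq.length := by omega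
          refine ⟨seq[p], List.getElem?_eq_getElem hplen, ?_⟩
          intro hv
          exact hgap p (le_refl p) hplt (by rw [List.getElem?_eq_getElem hplen, hv])
        obtain ⟨v, hv, hvne⟩ := hsomev
        have hvb : (v == "array") = false := by simpa using hvne
        have hstep : pvAStep e seq (n, subs, tmp) x =
            (n + 1, subs ++ [n + 1],
             tmp ++ [e (PySem.List.slice seq (some (p : Int)) none) (PySem.List.slice seq (some ((n : Nat) : Int)) none),
                     e (PySem.List.slice seq (some ((n : Nat) : Int)) none) (PySem.List.slice seq (some ((n + 1 : Nat) : Int)) none)]) := by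
          simp [pvAStep, hx, hpget, hv, hvb]
        rw [hstep, ih (n + 1) (n + 1) (subs ++ [n + 1]) _ hxs (by omega) hgap' hlast']
        rw [pvPos_cons, if_pos (by simp [hxe])]
        have hpne : ¬ ((p : Int) = (n : Int)) := by exact_mod_cast hpe
        have hseg : pvPairs ((n : Int) :: pvPos xs ((n : Int) + 1)) (p : Int) =
            [((p : Int), (n : Int)), ((n : Int), (n : Int) + 1)] ++ pvPairs (pvPos xs ((n : Int) + 1)) ((n : Int) + 1) := by
          simp [pvPairs, hpne]
        rw [hseg]
        refine Prod.ext (by simp; omega) (Prod.ext ?_ ?_)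
        · simp
        · push_cast
          simp [List.append_assoc]
    · -- x is not "array"
      have hstep : pvAStep e seq (n, subs, tmp) x = (n + 1, subs, tmp) := by
        simp [pvAStep, hx]
      have hgap' : ∀ k : Nat, p ≤ k → k < n + 1 → seq[k]? ≠ some "array" := by
        intro k h1 h2
        rcases Nat.lt_succ_iff_lt_or_eq.mp h2 with h | h
        · exact hgap k h1 h
        · subst h; rw [hn]
          simp only [ne_eq, Option.some.injEq]
          intro hc; subst hc; simp at hx
      rw [hstep, ih (n + 1) p subs tmp hxs (by omega) hgap' hlast]
      rw [pvPos_cons, if_neg (by simpa using hx)]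
      refine Prod.ext (by simp; omega) (Prod.ext ?_ ?_)
      · push_cast; rfl
      · push_cast; rfl

-- The filtered range of B's cut predicate, from the running position, is pvCutsOf.
lemma pvG (seq : List String) :
    ∀ (t : List String) (n p : Nat),
      seq.drop n = t → n ≤ seq.length → p ≤ n →
      (p = n → (n = 0 ∨ seq[n - 1]? = some "array")) →
      (∀ k : Nat, p ≤ k → k < n → seq[k]? ≠ some "array") →
      (PySem.List.pyRange (if p = n then (n : Int) + 1 else (n : Int)) ((seq.length : Int) + 1) 1).filter (pvCutP seq)
        = pvCutsOf (pvPos t (n : Int)) (p : Int) := by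
  intro t
  induction t with
  | nil =>
    intro n p ht hnlen hpn _hprev hgap
    have hlen : seq.length ≤ n := List.drop_eq_nil_iff.mp ht
    have hne : n = seq.length := by omega
    rw [pvPos_nil]
    by_cases hpe : p = n
    · rw [if_pos hpe, PySem.List.pyRange_one_eq_nil (by omega)]
      simp [pvCutsOf]
    · rw [if_neg hpe]
      have hn1 : 1 ≤ n := by omega
      have hr1 : PySem.List.pyRange (n : Int) ((seq.length : Int) + 1) 1 = [(n : Int)] := by
        rw [show ((seq.length : Int) + 1) = (n : Int) + 1 by omega]
        exact PySem.List.pyRange_one_singleton _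
      rw [hr1, List.filter_cons]
      have hidx : ((n : Int) - 1) = ((n - 1 : Nat) : Int) := by omega
      have hsomev : ∃ v, seq[n - 1]? = some v ∧ v ≠ "array" := by
        have hplen : n - 1 < seq.length := by omega
        refine ⟨seq[n - 1], List.getElem?_eq_getElem hplen, ?_⟩
        intro hv
        exact hgap (n - 1) (by omega) (by omega) (by rw [List.getElem?_eq_getElem hplen, hv])
      obtain ⟨v, hv, hvne⟩ := hsomev
      have hpred : pvCutP seq (n : Int) = false := by
        simp only [pvCutP, hidx, PySem.List.pyGet?_natCast, hv]
        have h0 : ((n : Int) == 0) = false := by simp; omega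
        have h2 : decide ((n : Int) < (seq.length : Int)) = false := by simp; omega
        simp [h0, hvne]
        exact fun h => absurd h (by omega)
      simp [hpred, pvCutsOf]
  | cons x xs ih =>
    intro n p ht hnlen hpn hprev hgap
    have hn : seq[n]? = some x := by
      have h0 : (seq.drop n)[0]? = seq[n + 0]? := List.getElem?_drop
      rw [ht] at h0
      simp only [List.getElem?_cons_zero, Nat.add_zero] at h0
      exact h0.symm
    have hxs : seq.drop (n + 1) = xs := by
      rw [← List.tail_drop, ht]; rfl
    have hnlt : n < seq.length := by
      by_contra hc
      rw [List.getElem?_eq_none (by omega)] at hn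
      cases hn
    rw [pvPos_cons]
    by_cases hx : x == "array"
    · rw [if_pos hx]
      have hxe : x = "array" := by simpa using hx
      have hnarr : seq[n]? = some "array" := by rw [hn, hxe]
      have hIH := ih (n + 1) (n + 1) hxs (by omega) (le_refl _)
        (fun _ => Or.inr (by simpa using hnarr)) (by intro k h1 h2; omega)
      rw [if_pos rfl] at hIH
      push_cast at hIH
      have hpredn1 : pvCutP seq ((n : Int) + 1) = true := by
        have hidx : ((n : Int) + 1 - 1) = ((n : Nat) : Int) := by omega
        simp only [pvCutP, hidx, PySem.List.pyGet?_natCast, hnarr]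
        simp
      by_cases hpe : p = n
      · rw [if_pos hpe]
        rw [PySem.List.pyRange_one_cons (by omega), List.filter_cons, hpredn1]
        rw [show ((n : Int) + 1 + 1) = ((n : Int) + 1) + 1 by ring] at hIH ⊢
        rw [hIH]
        have hc : ((p : Int) = (n : Int)) := by exact_mod_cast hpe
        simp [pvCutsOf, hc]
      · rw [if_neg hpe]
        have hn1 : 1 ≤ n := by omega
        have hidx : ((n : Int) - 1) = ((n - 1 : Nat) : Int) := by omega
        have hsomev : ∃ v, seq[n - 1]? = some v ∧ v ≠ "array" := by
          have hplen : n - 1 < seq.length := by omega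
          refine ⟨seq[n - 1], List.getElem?_eq_getElem hplen, ?_⟩
          intro hv
          exact hgap (n - 1) (by omega) (by omega) (by rw [List.getElem?_eq_getElem hplen, hv])
        obtain ⟨v, hv, hvne⟩ := hsomev
        have hpredn : pvCutP seq (n : Int) = true := by
          simp only [pvCutP, hidx, PySem.List.pyGet?_natCast, hv, hnarr]
          simp [hvne]
          omega
        rw [PySem.List.pyRange_one_cons (by omega), List.filter_cons, hpredn,
            PySem.List.pyRange_one_cons (by omega), List.filter_cons, hpredn1]
        rw [show ((n : Int) + 1 + 1) = ((n : Int) + 1) + 1 by ring] at hIH ⊢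
        rw [hIH]
        have hc : ¬ ((p : Int) = (n : Int)) := by exact_mod_cast hpe
        simp [pvCutsOf, hc]
    · rw [if_neg hx]
      have hgap' : ∀ k : Nat, p ≤ k → k < n + 1 → seq[k]? ≠ some "array" := by
        intro k h1 h2
        rcases Nat.lt_succ_iff_lt_or_eq.mp h2 with h | h
        · exact hgap k h1 h
        · subst h; rw [hn]
          simp only [ne_eq, Option.some.injEq]
          intro hc; subst hc; simp at hx
      have hIH := ih (n + 1) p hxs (by omega) (by omega)
        (fun hc => absurd hc (by omega)) hgap'
      rw [if_neg (by omega)] at hIH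
      push_cast at hIH
      by_cases hpe : p = n
      · rw [if_pos hpe]
        exact hIH
      · rw [if_neg hpe]
        have hn1 : 1 ≤ n := by omega
        have hidx : ((n : Int) - 1) = ((n - 1 : Nat) : Int) := by omega
        have hsomev : ∃ v, seq[n - 1]? = some v ∧ v ≠ "array" := by
          have hplen : n - 1 < seq.length := by omega
          refine ⟨seq[n - 1], List.getElem?_eq_getElem hplen, ?_⟩
          intro hv
          exact hgap (n - 1) (by omega) (by omega) (by rw [List.getElem?_eq_getElem hplen, hv])
        obtain ⟨v, hv, hvne⟩ := hsomev
        have hxne : x ≠ "array" := by simpa using hx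
        have hpredn : pvCutP seq (n : Int) = false := by
          simp only [pvCutP, hidx, PySem.List.pyGet?_natCast, hv, hn]
          have h0 : ((n : Int) == 0) = false := by simp; omega
          simp [h0, hvne, hxne]
        rw [PySem.List.pyRange_one_cons (by omega), List.filter_cons, hpredn]
        simpa using hIH

-- the full cut list: a leading 0, then pvCutsOf over all array positions
lemma pvCuts_eq (seq : List String) :
    (PySem.List.pyRange 0 ((seq.length : Int) + 1) 1).filter (pvCutP seq)
      = 0 :: pvCutsOf (pvPos seq 0) 0 := by
  have h := pvG seq seq 0 0 (by simp) (by omega) (le_refl 0) (fun _ => Or.inl rfl)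
    (by intro k h1 h2; omega)
  rw [if_pos rfl] at h
  rw [PySem.List.pyRange_one_cons (by omega), List.filter_cons]
  have hpred0 : pvCutP seq 0 = true := by simp [pvCutP]
  rw [hpred0]
  simp only [Nat.cast_zero, zero_add] at h ⊢
  rw [h]
  simp

lemma pvCutsOf_nil_iff (pos : List Int) (p : Int) : pvCutsOf pos p = [] ↔ pos = [] := by
  cases pos with
  | nil => simp [pvCutsOf]
  | cons j rest => by_cases hpj : p = j <;> simp [pvCutsOf, hpj]

lemma pvCutsOf_last : ∀ (pos : List Int) (p : Int),
    (p :: pvCutsOf pos p).getLast? = some (match pos.getLast? with | none => p | some j => j + 1) := by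
  intro pos
  induction pos with
  | nil => intro p; simp [pvCutsOf]
  | cons j rest ih =>
    intro p
    have hsplit : p :: pvCutsOf (j :: rest) p =
        (if p = j then [p] else [p, j]) ++ ((j + 1) :: pvCutsOf rest (j + 1)) := by
      by_cases hpj : p = j <;> simp [pvCutsOf, hpj]
    rw [hsplit, List.getLast?_append_of_ne_nil _ (by simp), ih (j + 1)]
    cases hr : rest.getLast? with
    | none =>
      have : rest = [] := List.getLast?_eq_none_iff.mp hr
      subst this; simp
    | some k =>
      simp [List.getLast?_cons, hr]

lemma pvZipAdj_cons₂ {α : Type} (a b : α) (l : List α) :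
    pvZipAdj (a :: b :: l) = (a, b) :: pvZipAdj (b :: l) := rfl

lemma pvZint : ∀ (pos : List Int) (p : Int), pvZipAdj (p :: pvCutsOf pos p) = pvPairs pos p := by
  intro pos
  induction pos with
  | nil => intro p; simp [pvCutsOf, pvPairs, pvZipAdj]
  | cons j rest ih =>
    intro p
    by_cases hpj : p = j
    · have : p :: pvCutsOf (j :: rest) p = p :: (j + 1) :: pvCutsOf rest (j + 1) := by
        simp [pvCutsOf, hpj]
      rw [this, pvZipAdj_cons₂, ih (j + 1)]
      simp [pvPairs, hpj]
    · have : p :: pvCutsOf (j :: rest) p = p :: j :: (j + 1) :: pvCutsOf rest (j + 1) := by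
        simp [pvCutsOf, hpj]
      rw [this, pvZipAdj_cons₂, pvZipAdj_cons₂, ih (j + 1)]
      simp [pvPairs, hpj]

lemma pvZipAdj_append {α : Type} : ∀ (l1 : List α) (a b : α) (l2 : List α),
    pvZipAdj ((a :: l1) ++ (b :: l2)) =
      pvZipAdj (a :: l1) ++ ((a :: l1).getLast (by simp), b) :: pvZipAdj (b :: l2) := by
  intro l1
  induction l1 with
  | nil => intro a b l2; simp [pvZipAdj]
  | cons c l1' ih =>
    intro a b l2
    have h1 : (a :: c :: l1') ++ (b :: l2) = a :: c :: (l1' ++ b :: l2) := by simp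
    rw [h1, pvZipAdj_cons₂]
    have h2 : c :: (l1' ++ b :: l2) = (c :: l1') ++ (b :: l2) := by simp
    rw [h2, ih c b l2, pvZipAdj_cons₂]
    simp [List.getLast_cons]

lemma pvZipAdj_reverse {α : Type} : ∀ (l : List α),
    pvZipAdj l.reverse = ((pvZipAdj l).map Prod.swap).reverse := by
  intro l
  induction l with
  | nil => simp [pvZipAdj]
  | cons a t ih =>
    cases t with
    | nil => simp [pvZipAdj]
    | cons c l' =>
      rw [pvZipAdj_cons₂]
      cases hrev : (c :: l').reverse with
      | nil => simp at hrev
      | cons h m =>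
        have hlast : (h :: m).getLast (by simp) = c := by
          have h1 : (h :: m).getLast? = some c := by
            rw [← hrev, List.getLast?_reverse]; rfl
          rwa [List.getLast?_eq_some_getLast (by simp), Option.some_inj] at h1
        have : (a :: c :: l').reverse = (h :: m) ++ ([a] : List α) := by
          rw [← hrev]; simp
        rw [this, pvZipAdj_append (l2 := ([] : List α)), hlast, ← hrev, ih]
        simp [pvZipAdj]

lemma pvZipAdj_map {α β : Type} (f : α → β) (l : List α) :
    pvZipAdj (l.map f) = (pvZipAdj l).map (fun pr => (f pr.1, f pr.2)) := by
  unfold pvZipAdj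
  rw [← List.map_tail, List.zip_map]
  simp [Prod.map]

-- A's outer step in terms of pvAStep (definitionally A's loop body).
def pvOutA (u : List (String × List String × List String)) (action : String × List String × List String) :
    List (String × List String × List String) :=
  if action.1 != "coerce" then u ++ [action]
  else
    let src := action.2.1
    let st := src.foldl (pvAStep (fun a b => ("coerce", a, b)) src) (0, [0], [])
    if st.2.1.length == 1 then u ++ [action]
    else
      let last_src := PySem.List.slice src (some (((PySem.List.pyGet? st.2.1 (-1)).getD 0 : Nat) : Int)) none
      let dst := action.2.2
      let dt := dst.foldl (pvAStep (fun a b => ("coerce", b, a)) dst) (0, [0], [])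
      let first_dst := PySem.List.slice dst (some (((PySem.List.pyGet? dt.2.1 (-1)).getD 0 : Nat) : Int)) none
      u ++ st.2.2 ++ [("coerce", last_src, first_dst)] ++ dt.2.2.reverse

-- B's outer step.
def pvOutB (u : List (String × List String × List String)) (action : String × List String × List String) :
    List (String × List String × List String) :=
  if action.1 == "coerce" then
    let src_nodes := pvNodes action.2.1
    if 1 < src_nodes.length then
      let chain := src_nodes ++ (pvNodes action.2.2).reverse
      u ++ (chain.zip (PySem.List.slice chain (some 1) none)).map (fun pr => ("coerce", pr.1, pr.2))
    else u ++ [action]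
  else u ++ [action]

-- the boundary A reads back from sub_indices[-1], expressed through the positions list
lemma pvLastSub (pos : List Int) (f : Int → Nat) :
    ((PySem.List.pyGet? ([0] ++ pos.map f) (-1)).getD 0 : Nat) =
      (match pos.getLast? with | none => 0 | some j => f j) := by
  rw [PySem.List.pyGet?_neg_one]
  cases hpos : pos.getLast? with
  | none =>
    have : pos = [] := List.getLast?_eq_none_iff.mp hpos
    subst this; simp
  | some j =>
    have hne : pos ≠ [] := by intro h; subst h; simp at hpos
    have hmne : pos.map f ≠ [] := by simpa using hne
    rw [List.getLast?_append_of_ne_nil _ hmne, List.getLast?_map, hpos]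
    rfl

lemma pvSide (e : List String → List String → String × List String × List String) (seq : List String) :
    seq.foldl (pvAStep e seq) (0, [0], []) =
      (seq.length,
       [0] ++ (pvPos seq 0).map (fun j => j.toNat + 1),
       (pvPairs (pvPos seq 0) 0).map
         (fun pr => e (PySem.List.slice seq (some pr.1) none) (PySem.List.slice seq (some pr.2) none))) := by
  have h := pvGrand e seq seq 0 0 [0] [] (by simp) (le_refl 0) (by intro k h1 h2; omega) rfl
  simpa using h

lemma pvNodes_eq (seq : List String) :
    pvNodes seq = (0 :: pvCutsOf (pvPos seq 0) 0).map (fun i => PySem.List.slice seq (some i) none) := by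
  unfold pvNodes; rw [pvCuts_eq]

lemma pvLastIdx (seq : List String) :
    (((PySem.List.pyGet? ([0] ++ (pvPos seq 0).map (fun j => j.toNat + 1)) (-1)).getD 0 : Nat) : Int)
      = (match (pvPos seq 0).getLast? with | none => 0 | some j => j + 1) := by
  rw [pvLastSub]
  cases h : (pvPos seq 0).getLast? with
  | none => simp
  | some j =>
    have hj : (0 : Int) ≤ j := pvPos_ge seq 0 j (List.mem_of_getLast? h)
    simp; omega

lemma pvNodes_last (seq : List String) :
    (pvNodes seq).getLast? = some (PySem.List.slice seq
      (some (match (pvPos seq 0).getLast? with | none => 0 | some j => j + 1)) none) := by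
  rw [pvNodes_eq, List.getLast?_map, pvCutsOf_last]
  rfl

lemma pvOutEq : pvOutA = pvOutB := by
  funext u action
  unfold pvOutA pvOutB
  by_cases hc : (action.1 != "coerce") = true
  · have hcb : (action.1 == "coerce") = false := by simpa [bne] using hc
    simp [hc, hcb]
  · have hcb : (action.1 == "coerce") = true := by simpa [bne] using hc
    rw [if_neg hc, if_pos hcb]
    dsimp only
    rw [pvSide (fun a b => ("coerce", a, b)) action.2.1]
    rw [pvNodes_eq action.2.1]
    by_cases hpos : pvPos action.2.1 0 = []
    · -- no "array" in src: both keep the action unchanged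
      rw [hpos]
      simp [pvCutsOf]
    · have hcuts : pvCutsOf (pvPos action.2.1 0) 0 ≠ [] := by
        rw [ne_eq, pvCutsOf_nil_iff]; exact hpos
      have hlenA : (([0] ++ (pvPos action.2.1 0).map (fun j : Int => j.toNat + 1)).length == 1) = false := by
        simp only [List.length_append, List.length_map, List.length_cons, List.length_nil, beq_eq_false_iff_ne]
        have := List.length_pos_of_ne_nil hpos
        omega
      have hlenB : 1 < ((0 :: pvCutsOf (pvPos action.2.1 0) 0).map
          (fun i => PySem.List.slice action.2.1 (some i) none)).length := by
        simp only [List.length_map, List.length_cons]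
        have := List.length_pos_of_ne_nil hcuts
        omega
      rw [hlenA, if_pos hlenB]
      simp only [Bool.false_eq_true, if_false]
      rw [pvSide (fun a b => ("coerce", b, a)) action.2.2]
      rw [pvLastIdx action.2.1, pvLastIdx action.2.2]
      rw [PySem.List.slice_from_one]
      -- name the two node lists
      rw [← pvNodes_eq action.2.1]
      cases hdr : (pvNodes action.2.2).reverse with
      | nil =>
        exfalso
        have : pvNodes action.2.2 = [] := by
          have := congrArg List.reverse hdr
          simpa using this
        rw [pvNodes_eq] at this
        simp at this
      | cons b l2 =>
        have hb : b = PySem.List.slice action.2.2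
            (some (match (pvPos action.2.2 0).getLast? with | none => 0 | some j => j + 1)) none := by
          have h1 : (pvNodes action.2.2).reverse.head? = some b := by rw [hdr]; rfl
          rw [List.head?_reverse, pvNodes_last] at h1
          exact (Option.some_inj.mp h1).symm
        have hsn : pvNodes action.2.1 =
            PySem.List.slice action.2.1 (some 0) none ::
              (pvCutsOf (pvPos action.2.1 0) 0).map (fun i => PySem.List.slice action.2.1 (some i) none) := by
          rw [pvNodes_eq]; rfl
        have hzip : (pvNodes action.2.1 ++ b :: l2).zip (pvNodes action.2.1 ++ b :: l2).tail
            = pvZipAdj (pvNodes action.2.1 ++ b :: l2) := rfl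
        rw [hzip, hsn, pvZipAdj_append]
        have hglE : (PySem.List.slice action.2.1 (some 0) none ::
              (pvCutsOf (pvPos action.2.1 0) 0).map (fun i => PySem.List.slice action.2.1 (some i) none)).getLast (by simp) =
            PySem.List.slice action.2.1
              (some (match (pvPos action.2.1 0).getLast? with | none => 0 | some j => j + 1)) none := by
          have h1 : (PySem.List.slice action.2.1 (some 0) none ::
              (pvCutsOf (pvPos action.2.1 0) 0).map (fun i => PySem.List.slice action.2.1 (some i) none)).getLast?
              = some (PySem.List.slice action.2.1
                  (some (match (pvPos action.2.1 0).getLast? with | none => 0 | some j => j + 1)) none) := by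
            rw [← hsn]; exact pvNodes_last action.2.1
          rwa [List.getLast?_eq_some_getLast (by simp), Option.some_inj] at h1
        have hzs : pvZipAdj (PySem.List.slice action.2.1 (some 0) none ::
              (pvCutsOf (pvPos action.2.1 0) 0).map (fun i => PySem.List.slice action.2.1 (some i) none)) =
            (pvPairs (pvPos action.2.1 0) 0).map
              (fun pr => (PySem.List.slice action.2.1 (some pr.1) none, PySem.List.slice action.2.1 (some pr.2) none)) := by
          rw [show (PySem.List.slice action.2.1 (some 0) none ::
              (pvCutsOf (pvPos action.2.1 0) 0).map (fun i => PySem.List.slice action.2.1 (some i) none))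
            = (0 :: pvCutsOf (pvPos action.2.1 0) 0).map (fun i => PySem.List.slice action.2.1 (some i) none) from rfl]
          rw [pvZipAdj_map, pvZint]
        have hzd : pvZipAdj (b :: l2) =
            (((pvPairs (pvPos action.2.2 0) 0).map
              (fun pr => (PySem.List.slice action.2.2 (some pr.1) none, PySem.List.slice action.2.2 (some pr.2) none))).map
                Prod.swap).reverse := by
          rw [← hdr, pvZipAdj_reverse, pvNodes_eq, pvZipAdj_map, pvZint]
        rw [hzs, hzd, hglE, hb]
        simp only [List.map_append, List.map_cons, List.map_reverse, List.map_map, List.append_assoc, List.singleton_append]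
        rfl


lemma pvFilterEq (l : List (String × List String × List String)) :
    l.foldl (fun r ac => if ac.2.1 == ac.2.2 then r else r ++ [ac]) [] =
      l.filter (fun ac => ac.2.1 != ac.2.2) := by
  have hfun : (fun (r : List (String × List String × List String)) ac => if ac.2.1 == ac.2.2 then r else r ++ [ac])
      = fun r ac => if (ac.2.1 != ac.2.2) then r ++ [ac] else r := by
    funext r ac
    by_cases h : ac.2.1 == ac.2.2 <;> simp [bne, h]
  rw [hfun]
  simpa using PySem.List.foldl_append_if_eq_filter (fun ac => ac.2.1 != ac.2.2) l []

-- ===== VERDICT (by name: the statement is the Claim_ definition above) =====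
theorem pre_gencode_spec : Claim_equal_pre_gencode := by
  intro mapping_path _
  unfold Spec_pre_gencode
  show pre_gencode mapping_path = pre_gencode_alt mapping_path
  have hA : pre_gencode mapping_path =
      (mapping_path.foldl pvOutA []).foldl (fun r ac => if ac.2.1 == ac.2.2 then r else r ++ [ac]) [] := rfl
  have hB : pre_gencode_alt mapping_path =
      (mapping_path.foldl pvOutB []).filter (fun ac => ac.2.1 != ac.2.2) := rfl
  rw [hA, hB, pvOutEq, pvFilterEq]
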